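-- pv_equiv track=rewrite | github.com/ljm0850/algo-problem | baekjoon/29700 우당탕탕 영화예매.py | solution
-- ===== SOURCE A (Python) =====
-- def solution(R:int,C:int,K:int,theater:list[list[int]])->int:
--     if C < K:
--         return 0
--     ans = 0
--     for r in range(R):
--         value = 0
--         for i in range(K):
--             value += theater[r][i]
--         if value == 0:
--             ans += 1
--         s = 0
--         for e in range(K, C):
--             value += theater[r][e]
--             value -= theater[r][s]
--             s += 1
--             if value == 0:
--                 ans += 1
--     return ans
-- ===== SOURCE B (Python) =====
-- def solution(R: int, C: int, K: int, theater: list[list[int]]) -> int: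
--     if C < K:
--         return 0
--     ans = 0
--     for r in range(R):
--         row = theater[r]
--         P = [0]
--         for x in row[:C]:
--             P.append(P[-1] + x)
--         for j in range(C - K + 1):
--             if P[j + K] - P[j] == 0:
--                 ans += 1
--     return ans
-- ===== Notes on version B (the rewrite author's own statement) =====
-- stated objective: alternative
-- what changed: B replaces A's incrementally-updated sliding-window sum (add the entering cell, subtract the leaving cell) by building, per row, a full prefix-sum table P of length C+1 and counting the window offsets j with P[j+K]-P[j]==0.
-- outside the precondition, e.g. on solution(1, 1, -1, [[0, 0]]): A returns 3, B raises IndexError; on solution(1, 2, 1, [[0]]): A raises IndexError, B raises IndexError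
import Mathlib
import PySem

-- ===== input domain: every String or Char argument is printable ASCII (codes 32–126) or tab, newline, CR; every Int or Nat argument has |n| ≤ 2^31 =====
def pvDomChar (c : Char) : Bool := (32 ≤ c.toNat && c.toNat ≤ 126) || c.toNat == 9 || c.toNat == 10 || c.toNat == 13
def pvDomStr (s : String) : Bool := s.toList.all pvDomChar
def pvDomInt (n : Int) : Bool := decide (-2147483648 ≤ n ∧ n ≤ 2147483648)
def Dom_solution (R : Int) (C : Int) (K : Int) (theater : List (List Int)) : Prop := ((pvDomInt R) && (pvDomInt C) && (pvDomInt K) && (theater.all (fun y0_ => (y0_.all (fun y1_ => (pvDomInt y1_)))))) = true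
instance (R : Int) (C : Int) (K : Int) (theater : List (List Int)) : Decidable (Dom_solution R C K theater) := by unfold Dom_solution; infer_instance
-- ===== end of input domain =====

-- B replaces A's incrementally updated sliding-window sum by a per-row prefix-sum table
-- P (length C+1) and counts offsets j with P[j+K]-P[j]=0; same cost, different structure.

-- ===== PORT A =====
def solution (R : Int) (C : Int) (K : Int) (theater : List (List Int)) : Int :=
  if C < K then 0 else
    (PySem.List.pyRange 0 R 1).foldl (fun ans r =>
      let row := PySem.List.pyGetD theater r []
      let value := (PySem.List.pyRange 0 K 1).foldl
        (fun v i => v + PySem.List.pyGetD row i 0) 0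
      let ans1 := if value = 0 then ans + 1 else ans
      let st := (PySem.List.pyRange K C 1).foldl
        (fun (st : Int × Int × Int) e =>
          (st.1 + PySem.List.pyGetD row e 0 - PySem.List.pyGetD row st.2.1 0,
           st.2.1 + 1,
           if st.1 + PySem.List.pyGetD row e 0 - PySem.List.pyGetD row st.2.1 0 = 0
           then st.2.2 + 1 else st.2.2))
        (value, 0, ans1)
      st.2.2) 0

-- ===== PORT B =====
def solution_alt (R : Int) (C : Int) (K : Int) (theater : List (List Int)) : Int :=
  if C < K then 0 else
    (PySem.List.pyRange 0 R 1).foldl (fun ans r =>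
      let row := PySem.List.pyGetD theater r []
      let P := (PySem.List.slice row none (some C)).foldl
        (fun (P : List Int) x => P ++ [PySem.List.pyGetD P (-1) 0 + x]) [0]
      (PySem.List.pyRange 0 (C - K + 1) 1).foldl
        (fun a j => if PySem.List.pyGetD P (j + K) 0 - PySem.List.pyGetD P j 0 = 0
                    then a + 1 else a) ans) 0

-- ===== PRECONDITION & SPEC =====
-- Pre_ excludes inputs where A raises IndexError (R beyond theater's length, or a row
-- shorter than C), and negative-K inputs where any value A returns comes from Python's
-- negative-index wraparound, an accident of A's implementation (B itself raises there).
def Pre_solution (R : Int) (C : Int) (K : Int) (theater : List (List Int)) : Prop :=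
  C < K ∨ (0 ≤ K ∧ R ≤ (theater.length : Int) ∧
    ∀ row ∈ theater.take R.toNat, C ≤ (row.length : Int))
instance (R : Int) (C : Int) (K : Int) (theater : List (List Int)) : Decidable (Pre_solution R C K theater) := by unfold Pre_solution; infer_instance

def pvWitness_solution : Int × Int × Int × List (List Int) :=
  (2, 3, 2, [[1, -1, 0], [2, 0, -2]])

def Spec_solution (R : Int) (C : Int) (K : Int) (theater : List (List Int)) (out : Int) : Prop := out = solution_alt R C K theater
instance (R : Int) (C : Int) (K : Int) (theater : List (List Int)) (out : Int) : Decidable (Spec_solution R C K theater out) := by unfold Spec_solution; infer_instance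

-- ===== CLAIM (what is proved, stated in full; the proofs are below) =====
def Claim_equal_solution : Prop := ∀ (R : Int) (C : Int) (K : Int) (theater : List (List Int)), Dom_solution R C K theater → Pre_solution R C K theater → Spec_solution R C K theater (solution R C K theater)

-- ===== LEMMAS AND PROOFS =====

-- sum of the K-window of `row` starting at index j
def wsum (row : List Int) (j k : Nat) : Int := ((row.drop j).take k).sum

-- number of j in [j0, j0+n) whose window sum is zero
def cntZ (row : List Int) (k j0 n : Nat) : Int :=
  match n with
  | 0 => 0
  | n + 1 => (if wsum row j0 k = 0 then 1 else 0) + cntZ row k (j0 + 1) n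

theorem sum_take_succ_int (l : List Int) : ∀ (i : Nat), i < l.length →
    (l.take (i + 1)).sum = (l.take i).sum + l.getD i 0 := by
  induction l with
  | nil => intro i h; simp at h
  | cons x xs ih =>
    intro i h
    cases i with
    | zero => simp
    | succ j =>
      have hj : j < xs.length := by simpa using h
      rw [List.take_succ_cons, List.take_succ_cons, List.sum_cons, List.sum_cons,
        ih j hj, List.getD_cons_succ]
      ring

theorem sum_range_getD (l : List Int) : ∀ (k : Nat), k ≤ l.length →
    ((List.range k).map (fun i => l.getD i 0)).sum = (l.take k).sum := by
  intro k
  induction k with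
  | zero => intro _; simp
  | succ k ih =>
    intro h
    rw [List.range_succ, List.map_append, List.sum_append, ih (by omega),
      sum_take_succ_int l k (by omega)]
    simp

theorem wsum_slide (row : List Int) (k s : Nat) (h : s + k < row.length) :
    wsum row s k + row.getD (s + k) 0 - row.getD s 0 = wsum row (s + 1) k := by
  cases k with
  | zero => simp [wsum]
  | succ m =>
    have hs : s < row.length := by omega
    have h1 : s + 1 + m < row.length := by omega
    have hd : row.drop s = row.getD s 0 :: row.drop (s + 1) := by
      rw [List.getD_eq_getElem _ _ hs]; exact List.drop_eq_getElem_cons hs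
    have hA : wsum row s (m + 1) = row.getD s 0 + wsum row (s + 1) m := by
      simp [wsum, hd]
    have hm : m < (row.drop (s + 1)).length := by
      rw [List.length_drop]; omega
    have hB : wsum row (s + 1) (m + 1) = wsum row (s + 1) m + row.getD (s + 1 + m) 0 := by
      rw [wsum, sum_take_succ_int (row.drop (s + 1)) m hm]
      have hg : (row.drop (s + 1)).getD m 0 = row.getD (s + 1 + m) 0 := by
        rw [List.getD_eq_getElem _ _ hm, List.getD_eq_getElem _ _ h1]
        simp [List.getElem_drop]
      rw [hg]; rfl
    rw [show s + (m + 1) = s + 1 + m from by omega, hA, hB]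
    ring

-- A's initial window value
theorem initA (row : List Int) (k : Nat) (hk : k ≤ row.length) :
    (PySem.List.pyRange 0 (k : Int) 1).foldl
      (fun v i => v + PySem.List.pyGetD row i 0) 0 = wsum row 0 k := by
  rw [PySem.List.foldl_add, PySem.List.pyRange_one,
    show ((k : Int) - 0).toNat = k from by simp, List.map_map]
  have h2 : ∀ j ∈ List.range k,
      ((fun i => PySem.List.pyGetD row i 0) ∘ fun j : Nat => (0 : Int) + ↑j) j
        = row.getD j 0 := by
    intro j _; simp
  rw [List.map_congr_left h2, sum_range_getD row k hk]
  simp [wsum]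

-- A's sliding loop
theorem slideA (row : List Int) (k : Nat) :
    ∀ (n s : Nat) (a : Int), s + k + n ≤ row.length →
    ((PySem.List.pyRange ((k + s : Nat) : Int) ((k + s + n : Nat) : Int) 1).foldl
      (fun (st : Int × Int × Int) e =>
        (st.1 + PySem.List.pyGetD row e 0 - PySem.List.pyGetD row st.2.1 0,
         st.2.1 + 1,
         if st.1 + PySem.List.pyGetD row e 0 - PySem.List.pyGetD row st.2.1 0 = 0
         then st.2.2 + 1 else st.2.2))
      (wsum row s k, (s : Int), a)).2.2
    = a + cntZ row k (s + 1) n := by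
  intro n
  induction n with
  | zero =>
    intro s a _
    rw [show ((k + s + 0 : Nat) : Int) = ((k + s : Nat) : Int) from by norm_num,
      PySem.List.pyRange_one_eq_nil le_rfl, List.foldl_nil]
    simp [cntZ]
  | succ n ih =>
    intro s a h
    rw [PySem.List.pyRange_one_cons
      (show ((k + s : Nat) : Int) < ((k + s + (n + 1) : Nat) : Int) from by push_cast; omega)]
    simp only [List.foldl_cons]
    have hget1 : PySem.List.pyGetD row ((k + s : Nat) : Int) 0 = row.getD (s + k) 0 := by
      rw [PySem.List.pyGetD_natCast]; congr 1; omega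
    have hget2 : PySem.List.pyGetD row ((s : Nat) : Int) 0 = row.getD s 0 :=
      PySem.List.pyGetD_natCast row s 0
    have hv : wsum row s k + PySem.List.pyGetD row ((k + s : Nat) : Int) 0
        - PySem.List.pyGetD row ((s : Nat) : Int) 0 = wsum row (s + 1) k := by
      rw [hget1, hget2]; exact wsum_slide row k s (by omega)
    rw [hv,
      show ((k + s : Nat) : Int) + 1 = ((k + (s + 1) : Nat) : Int) from by push_cast; ring,
      show ((k + s + (n + 1) : Nat) : Int) = ((k + (s + 1) + n : Nat) : Int) from by push_cast; ring,
      show ((s : Nat) : Int) + 1 = ((s + 1 : Nat) : Int) from by push_cast; ring,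
      ih (s + 1) (if wsum row (s + 1) k = 0 then a + 1 else a) (by omega),
      show cntZ row k (s + 1) (n + 1)
        = (if wsum row (s + 1) k = 0 then 1 else 0) + cntZ row k (s + 1 + 1) n from rfl]
    split_ifs <;> ring

-- B's prefix table is scanl
theorem buildP (l : List Int) : ∀ (P0 : List Int) (h : P0 ≠ []),
    l.foldl (fun (P : List Int) x => P ++ [PySem.List.pyGetD P (-1) 0 + x]) P0
      = P0.dropLast ++ List.scanl (· + ·) (P0.getLast h) l := by
  induction l with
  | nil =>
    intro P0 h
    rw [List.foldl_nil, List.scanl_nil]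
    exact (List.dropLast_append_getLast h).symm
  | cons x l ih =>
    intro P0 h
    simp only [List.foldl_cons]
    rw [PySem.List.pyGetD_neg_one P0 0 h]
    have hne : P0 ++ [P0.getLast h + x] ≠ [] := by simp
    rw [ih (P0 ++ [P0.getLast h + x]) hne, List.scanl_cons]
    have h1 : (P0 ++ [P0.getLast h + x]).dropLast = P0 := by simp
    have h2 : (P0 ++ [P0.getLast h + x]).getLast hne = P0.getLast h + x := by simp
    rw [h1, h2,
      show P0.dropLast ++ P0.getLast h :: List.scanl (· + ·) (P0.getLast h + x) l
        = (P0.dropLast ++ [P0.getLast h]) ++ List.scanl (· + ·) (P0.getLast h + x) l from by simp,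
      List.dropLast_append_getLast h]

theorem scanl_getD (l : List Int) : ∀ (t : Int) (i : Nat), i ≤ l.length →
    (List.scanl (· + ·) t l).getD i 0 = t + (l.take i).sum := by
  induction l with
  | nil =>
    intro t i h
    have : i = 0 := by simpa using h
    subst this
    simp [List.scanl_nil]
  | cons x xs ih =>
    intro t i h
    rw [List.scanl_cons]
    cases i with
    | zero => simp
    | succ j =>
      rw [List.getD_cons_succ, ih (t + x) j (by simpa using h),
        List.take_succ_cons, List.sum_cons]
      ring

theorem prefix_diff (row : List Int) (c j k : Nat) (h1 : j + k ≤ c) (_h2 : c ≤ row.length) :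
    ((row.take c).take (j + k)).sum - ((row.take c).take j).sum = wsum row j k := by
  have e1 : (row.take c).take (j + k) = row.take (j + k) := by
    rw [List.take_take]; congr 1; omega
  have e2 : (row.take c).take j = row.take j := by
    rw [List.take_take]; congr 1; omega
  rw [e1, e2, List.take_add, List.sum_append, wsum]
  ring

-- B's counting loop
theorem countB (row : List Int) (k : Nat) :
    ∀ (n j : Nat) (a : Int),
    (PySem.List.pyRange ((j : Nat) : Int) (((j : Nat) : Int) + ((n : Nat) : Int)) 1).foldl
      (fun a x => if wsum row x.toNat k = 0 then a + 1 else a) a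
    = a + cntZ row k j n := by
  intro n
  induction n with
  | zero =>
    intro j a
    rw [show ((j : Nat) : Int) + ((0 : Nat) : Int) = ((j : Nat) : Int) from by simp,
      PySem.List.pyRange_one_eq_nil le_rfl, List.foldl_nil]
    simp [cntZ]
  | succ n ih =>
    intro j a
    rw [PySem.List.pyRange_one_cons
      (show ((j : Nat) : Int) < ((j : Nat) : Int) + ((n + 1 : Nat) : Int) from by push_cast; omega)]
    simp only [List.foldl_cons]
    rw [show ((j : Nat) : Int).toNat = j from by simp,
      show ((j : Nat) : Int) + 1 = ((j + 1 : Nat) : Int) from by push_cast; ring,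
      show ((j : Nat) : Int) + ((n + 1 : Nat) : Int) = ((j + 1 : Nat) : Int) + ((n : Nat) : Int) from by push_cast; ring,
      ih (j + 1) (if wsum row j k = 0 then a + 1 else a),
      show cntZ row k j (n + 1)
        = (if wsum row j k = 0 then 1 else 0) + cntZ row k (j + 1) n from rfl]
    split_ifs <;> ring

-- per-row equality of the two inner computations
theorem row_eq (K C : Int) (row : List Int) (hK : 0 ≤ K) (hKC : K ≤ C)
    (hC : C ≤ (row.length : Int)) (ans : Int) :
    ((PySem.List.pyRange K C 1).foldl
        (fun (st : Int × Int × Int) e =>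
          (st.1 + PySem.List.pyGetD row e 0 - PySem.List.pyGetD row st.2.1 0,
           st.2.1 + 1,
           if st.1 + PySem.List.pyGetD row e 0 - PySem.List.pyGetD row st.2.1 0 = 0
           then st.2.2 + 1 else st.2.2))
        ((PySem.List.pyRange 0 K 1).foldl (fun v i => v + PySem.List.pyGetD row i 0) 0, 0,
         if (PySem.List.pyRange 0 K 1).foldl (fun v i => v + PySem.List.pyGetD row i 0) 0 = 0
         then ans + 1 else ans)).2.2
    = (PySem.List.pyRange 0 (C - K + 1) 1).foldl
        (fun a j =>
          if PySem.List.pyGetD ((PySem.List.slice row none (some C)).foldl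
                (fun (P : List Int) x => P ++ [PySem.List.pyGetD P (-1) 0 + x]) [0]) (j + K) 0
             - PySem.List.pyGetD ((PySem.List.slice row none (some C)).foldl
                (fun (P : List Int) x => P ++ [PySem.List.pyGetD P (-1) 0 + x]) [0]) j 0 = 0
          then a + 1 else a) ans := by
  obtain ⟨k, rfl⟩ : ∃ k : Nat, K = (k : Int) := ⟨K.toNat, (Int.toNat_of_nonneg hK).symm⟩
  obtain ⟨c, rfl⟩ : ∃ c : Nat, C = (c : Int) :=
    ⟨C.toNat, (Int.toNat_of_nonneg (le_trans hK hKC)).symm⟩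
  have hkc : k ≤ c := by exact_mod_cast hKC
  have hcl : c ≤ row.length := by exact_mod_cast hC
  have hlen : (row.take c).length = c := by rw [List.length_take]; omega
  -- left side: initial window value + sliding loop
  rw [initA row k (le_trans hkc hcl)]
  have hsl := slideA row k (c - k) 0 (if wsum row 0 k = 0 then ans + 1 else ans) (by omega)
  simp only [Nat.add_zero, Nat.cast_zero, Nat.zero_add] at hsl
  rw [show k + (c - k) = c from by omega] at hsl
  rw [hsl]
  -- right side: prefix table = scanl, then count window differences
  have hslice : PySem.List.slice row none (some ((c : Nat) : Int)) = row.take c := by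
    exact PySem.List.slice_to_natCast row c
  have hP : (row.take c).foldl
      (fun (P : List Int) x => P ++ [PySem.List.pyGetD P (-1) 0 + x]) [0]
      = List.scanl (· + ·) 0 (row.take c) := by
    simpa using buildP (row.take c) [0] (by simp)
  rw [hslice, hP]
  have hfun : ∀ (acc : Int) (jj : Int), jj ∈ PySem.List.pyRange 0 ((c : Int) - (k : Int) + 1) 1 →
      (if PySem.List.pyGetD (List.scanl (· + ·) 0 (row.take c)) (jj + (k : Int)) 0
          - PySem.List.pyGetD (List.scanl (· + ·) 0 (row.take c)) jj 0 = 0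
       then acc + 1 else acc)
      = (if wsum row jj.toNat k = 0 then acc + 1 else acc) := by
    intro acc jj hj
    rw [PySem.List.mem_pyRange_one] at hj
    obtain ⟨hj0, hj1⟩ := hj
    obtain ⟨jn, rfl⟩ : ∃ jn : Nat, jj = (jn : Int) := ⟨jj.toNat, (Int.toNat_of_nonneg hj0).symm⟩
    have hjk : jn + k ≤ c := by omega
    have g1 : PySem.List.pyGetD (List.scanl (· + ·) 0 (row.take c)) ((jn : Int) + (k : Int)) 0
        = ((row.take c).take (jn + k)).sum := by
      rw [show (jn : Int) + (k : Int) = ((jn + k : Nat) : Int) from by push_cast; ring,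
        PySem.List.pyGetD_natCast, scanl_getD (row.take c) 0 (jn + k) (by omega)]
      exact zero_add _
    have g2 : PySem.List.pyGetD (List.scanl (· + ·) 0 (row.take c)) ((jn : Int)) 0
        = ((row.take c).take jn).sum := by
      rw [PySem.List.pyGetD_natCast, scanl_getD (row.take c) 0 jn (by omega)]
      exact zero_add _
    rw [g1, g2, prefix_diff row c jn k hjk hcl]
    simp
  rw [PySem.List.foldl_congr_mem _ _ _ ans hfun]
  have hcB := countB row k (c - k + 1) 0 ans
  rw [show ((0 : Nat) : Int) = (0 : Int) from by simp,
    show (0 : Int) + ((c - k + 1 : Nat) : Int) = (c : Int) - (k : Int) + 1 from by omega] at hcB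
  rw [hcB,
    show cntZ row k 0 (c - k + 1)
      = (if wsum row 0 k = 0 then 1 else 0) + cntZ row k 1 (c - k) from rfl]
  split_ifs <;> ring

-- ===== VERDICT (by name: the statement is the Claim_ definition above) =====
theorem solution_spec : Claim_equal_solution := by
  intro R C K theater _hdom hpre
  unfold Spec_solution
  by_cases hCK : C < K
  · simp [solution, solution_alt, hCK]
  · rcases hpre with h | ⟨hK, hR, hrows⟩
    · exact absurd h hCK
    simp only [solution, solution_alt, if_neg hCK]
    refine PySem.List.foldl_congr_mem _ _ _ 0 ?_
    intro acc r hr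
    rw [PySem.List.mem_pyRange_one] at hr
    obtain ⟨hr0, hrR⟩ := hr
    obtain ⟨rn, rfl⟩ : ∃ rn : Nat, r = (rn : Int) := ⟨r.toNat, (Int.toNat_of_nonneg hr0).symm⟩
    have hrlen : rn < theater.length := by omega
    have hmem : theater.getD rn [] ∈ theater.take R.toNat := by
      have h2 : rn < R.toNat := by omega
      have h3 : rn < (theater.take R.toNat).length := by rw [List.length_take]; omega
      rw [List.getD_eq_getElem _ _ hrlen]
      have h4 : (theater.take R.toNat)[rn]'h3 = theater[rn]'hrlen := by
        simp [List.getElem_take]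
      rw [← h4]
      exact List.getElem_mem h3
    have hCrow : C ≤ ((theater.getD rn []).length : Int) := hrows _ hmem
    have hKC : K ≤ C := not_lt.mp hCK
    have hre := row_eq K C (theater.getD rn []) hK hKC hCrow acc
    simp only [PySem.List.pyGetD_natCast]
    exact hre
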